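-- pv_equiv track=rewrite | github.com/shankaraman/Academics | Cryptography/DES/des.py | initial_permutation
-- ===== SOURCE A (Python) =====
-- def initial_permutation(mapped_list):
--     encrypted_string = ''
--     for i in range(64):
--         if i in mapped_list:
--             encrypted_string+="1"
--     # Once mapped_list element is used then remove it, so that we can continue
--     # directly from the next element.
--             mapped_list.remove(i)
--         else:
--             encrypted_string+="0"
--     return encrypted_string
-- ===== SOURCE B (Python) =====
-- def initial_permutation(mapped_list):
--     # One pass over the list (O(n + 64)) instead of 64 membership scans (O(64*n)).
--     # Collect the set of in-range values present; rebuild the list keeping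
--     # out-of-range values and duplicate occurrences (same in-place mutation as A).
--     seen = set()
--     kept = []
--     for x in mapped_list:
--         if 0 <= x < 64 and x not in seen:
--             seen.add(x)
--         else:
--             kept.append(x)
--     mapped_list[:] = kept
--     return ''.join('1' if i in seen else '0' for i in range(64))
-- ===== Notes on version B (the rewrite author's own statement) =====
-- stated objective: faster
-- what changed: B replaces A's 64 membership scans (and 64 list.remove calls) with a single pass over the list that builds a set of in-range values present, then emits the 64-bit string from that set; the same in-place mutation is reproduced by rebuilding the list once.
import Mathlib
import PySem

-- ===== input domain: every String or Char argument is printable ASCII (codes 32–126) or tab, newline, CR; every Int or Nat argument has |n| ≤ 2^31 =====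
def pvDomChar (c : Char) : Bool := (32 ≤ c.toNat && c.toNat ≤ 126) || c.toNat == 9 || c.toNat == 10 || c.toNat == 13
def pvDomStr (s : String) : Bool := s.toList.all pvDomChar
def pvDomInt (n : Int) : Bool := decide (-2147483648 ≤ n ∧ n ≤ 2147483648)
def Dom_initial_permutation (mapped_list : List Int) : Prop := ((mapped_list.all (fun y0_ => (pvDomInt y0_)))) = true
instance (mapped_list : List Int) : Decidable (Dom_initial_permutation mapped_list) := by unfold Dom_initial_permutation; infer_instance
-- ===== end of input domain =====

-- B replaces A's 64 membership scans with one pass building a set of present in-range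
-- values (constant-factor faster); A also mutates mapped_list in place (removes one
-- occurrence of each present index 0–63) — Python B reproduces that mutation, and the
-- equivalence proved here is about the return value.

-- ===== PORT A =====
-- for i in range(64): if i in mapped_list: s += "1"; mapped_list.remove(i) else s += "0"
-- (remove? is guarded by the membership test, so the .getD default is never used)
def initial_permutation (mapped_list : List Int) : String :=
  ((PySem.List.pyRange 0 64 1).foldl
    (fun st i =>
      if i ∈ st.2 then (st.1 ++ "1", (PySem.List.remove? st.2 i).getD st.2)
      else (st.1 ++ "0", st.2))
    ("", mapped_list)).1

-- ===== PORT B =====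
-- one pass: seen = set of in-range values, kept = the rest; emit bits from seen
def initial_permutation_alt (mapped_list : List Int) : String :=
  String.join ((PySem.List.pyRange 0 64 1).map (fun i =>
    if i ∈ (mapped_list.foldl
      (fun (st : PySem.Set Int × List Int) x =>
        if 0 ≤ x ∧ x < 64 ∧ x ∉ st.1 then (PySem.Set.add st.1 x, st.2)
        else (st.1, st.2 ++ [x]))
      (PySem.Set.empty, [])).1 then "1" else "0"))

-- ===== PRECONDITION & SPEC =====
def Spec_initial_permutation (mapped_list : List Int) (out : String) : Prop := out = initial_permutation_alt mapped_list
instance (mapped_list : List Int) (out : String) : Decidable (Spec_initial_permutation mapped_list out) := by unfold Spec_initial_permutation; infer_instance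

-- ===== CLAIM (what is proved, stated in full; the proofs are below) =====
def Claim_equal_initial_permutation : Prop := ∀ (mapped_list : List Int), Dom_initial_permutation mapped_list → Spec_initial_permutation mapped_list (initial_permutation mapped_list)

-- ===== LEMMAS AND PROOFS =====

theorem pv_foldl_append (xs : List String) :
    ∀ s, xs.foldl (fun r t => r ++ t) s = s ++ xs.foldl (fun r t => r ++ t) "" := by
  induction xs with
  | nil => intro s; simp
  | cons x xs ih =>
    intro s
    simp only [List.foldl_cons]
    rw [ih (s ++ x), ih ("" ++ x)]
    simp [String.append_assoc]

theorem pv_join_cons (x : String) (xs : List String) :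
    String.join (x :: xs) = x ++ String.join xs := by
  simp only [String.join, List.foldl_cons]
  rw [pv_foldl_append]
  simp

-- A's loop over a duplicate-free index list: the string it builds is the membership
-- bitmap of the ORIGINAL list (removing an already-processed index never changes the
-- membership of a later, different index).
theorem lemA (is : List Int) (hnd : is.Nodup) :
    ∀ (s : String) (l : List Int),
      ((is.foldl
        (fun st i =>
          if i ∈ st.2 then (st.1 ++ "1", (PySem.List.remove? st.2 i).getD st.2)
          else (st.1 ++ "0", st.2))
        (s, l)).1)
      = s ++ String.join (is.map (fun i => if i ∈ l then "1" else "0")) := by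
  induction is with
  | nil => intro s l; simp [String.join]
  | cons i rest ih =>
    intro s l
    have hni : i ∉ rest := (List.nodup_cons.mp hnd).1
    have hnd' : rest.Nodup := (List.nodup_cons.mp hnd).2
    by_cases hi : i ∈ l
    · simp only [List.foldl_cons, if_pos hi,
        PySem.List.remove?_eq_some_erase l i hi, Option.getD_some]
      rw [ih hnd' (s ++ "1") (l.erase i)]
      have hmap : rest.map (fun j => if j ∈ l.erase i then "1" else "0")
          = rest.map (fun j => if j ∈ l then "1" else "0") := by
        apply List.map_congr_left
        intro j hj
        have : j ≠ i := fun h => hni (h ▸ hj)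
        simp [List.mem_erase_of_ne this]
      rw [hmap, List.map_cons, pv_join_cons, if_pos hi, String.append_assoc]
    · simp only [List.foldl_cons, if_neg hi]
      rw [ih hnd' (s ++ "0") l, List.map_cons, pv_join_cons, if_neg hi,
        String.append_assoc]

-- B's pass: the set it builds contains exactly the in-range elements (plus the seed).
theorem lemB (l : List Int) :
    ∀ (seen : PySem.Set Int) (kept : List Int) (i : Int),
      (i ∈ (l.foldl
        (fun (st : PySem.Set Int × List Int) x =>
          if 0 ≤ x ∧ x < 64 ∧ x ∉ st.1 then (PySem.Set.add st.1 x, st.2)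
          else (st.1, st.2 ++ [x]))
        (seen, kept)).1)
      ↔ (i ∈ seen ∨ (i ∈ l ∧ 0 ≤ i ∧ i < 64)) := by
  induction l with
  | nil => intro seen kept i; simp
  | cons x rest ih =>
    intro seen kept i
    by_cases hx : 0 ≤ x ∧ x < 64 ∧ x ∉ seen
    · obtain ⟨h0, h1, h2⟩ := hx
      simp only [List.foldl_cons, if_pos (⟨h0, h1, h2⟩ : 0 ≤ x ∧ x < 64 ∧ x ∉ seen)]
      rw [ih]
      by_cases hix : i = x
      · subst hix
        simp [PySem.Set.mem_add, h0, h1]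
      · simp [PySem.Set.mem_add, hix]
    · simp only [List.foldl_cons, if_neg hx]
      rw [ih]
      constructor
      · rintro (h | ⟨h1, h2⟩)
        · exact Or.inl h
        · exact Or.inr ⟨List.mem_cons_of_mem _ h1, h2⟩
      · rintro (h | ⟨h1, h2, h3⟩)
        · exact Or.inl h
        · rcases List.mem_cons.mp h1 with rfl | h1'
          · simp only [h2, h3, true_and, not_not] at hx
            simp [hx]
          · exact Or.inr ⟨h1', h2, h3⟩

-- ===== VERDICT (by name: the statement is the Claim_ definition above) =====
theorem initial_permutation_spec : Claim_equal_initial_permutation := by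
  intro l _
  unfold Spec_initial_permutation initial_permutation initial_permutation_alt
  rw [lemA _ (PySem.List.nodup_pyRange_one 0 64) "" l]
  have hmap : ((PySem.List.pyRange 0 64 1).map (fun i =>
        if i ∈ (l.foldl
          (fun (st : PySem.Set Int × List Int) x =>
            if 0 ≤ x ∧ x < 64 ∧ x ∉ st.1 then (PySem.Set.add st.1 x, st.2)
            else (st.1, st.2 ++ [x]))
          (PySem.Set.empty, [])).1 then "1" else "0"))
      = ((PySem.List.pyRange 0 64 1).map (fun i => if i ∈ l then "1" else "0")) := by
    apply List.map_congr_left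
    intro i hi
    rw [PySem.List.mem_pyRange_one] at hi
    simp only [lemB]
    simp [PySem.Set.empty, hi.1, hi.2]
  rw [hmap]
  simp
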